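-- pv_equiv track=rewrite | github.com/WattsUp/hardware-tools | hardware_tools/math/stats.py | bin_exact
-- ===== SOURCE A (Python) =====
-- from typing import Iterable, Tuple
--
-- def bin_exact(y: Iterable) -> Tuple[list, list]:
--   """Bin values with exact indices
--
--   Args:
--     y: Sample values
--
--   Returns:
--     counts, bins
--   """
--   counts = {}
--   for e in y:
--     if e in counts:
--       counts[e] += 1
--     else:
--       counts[e] = 1
--   bins = sorted(counts.keys())
--   counts = [counts[b] for b in bins]
--   return counts, bins
-- ===== SOURCE B (Python) =====
-- def bin_exact(y):
--   """Bin values with exact indices: sort once, then group runs of equal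
--   adjacent values in a single pass (bins are sorted by construction)."""
--   ys = sorted(y)
--   counts = []
--   bins = []
--   i = 0
--   n = len(ys)
--   while i < n:
--     v = ys[i]
--     j = i + 1
--     while j < n and ys[j] == v:
--       j += 1
--     counts.append(j - i)
--     bins.append(v)
--     i = j
--   return counts, bins
-- ===== Notes on version B (the rewrite author's own statement) =====
-- stated objective: alternative
-- what changed: Replaces A's dict frequency-count followed by a sort of the keys with a single sort of the input and one run-grouping pass that emits each distinct value and its run length, so bins come out sorted by construction.
import Mathlib
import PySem

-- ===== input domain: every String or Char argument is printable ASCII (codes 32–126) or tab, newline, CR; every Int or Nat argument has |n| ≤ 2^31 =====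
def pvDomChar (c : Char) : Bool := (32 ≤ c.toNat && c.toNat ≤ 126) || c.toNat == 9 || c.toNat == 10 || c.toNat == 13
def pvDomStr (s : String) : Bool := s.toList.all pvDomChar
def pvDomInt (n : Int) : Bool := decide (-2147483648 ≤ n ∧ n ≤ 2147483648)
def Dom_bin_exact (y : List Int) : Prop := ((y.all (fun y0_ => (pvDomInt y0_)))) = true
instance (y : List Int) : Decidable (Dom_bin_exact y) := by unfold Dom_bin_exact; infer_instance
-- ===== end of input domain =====

-- B replaces A's hash-count-then-sort-keys with a single sort followed by one
-- run-grouping pass (idiomatic sort-then-group); same return value everywhere.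

-- ===== PORT A =====
-- dict counter loop: `if e in counts: counts[e] += 1 else: counts[e] = 1`
def bin_exact (y : List Int) : List Int × List Int :=
  let counts : PySem.Dict Int Int :=
    y.foldl (fun d e => if d.contains e then d.insert e (d.getD e 0 + 1) else d.insert e 1)
      PySem.Dict.empty
  let bins := PySem.List.sorted counts.keys (fun b => b) false
  -- `counts[b]` for b ∈ counts.keys: the key is always present, so getD b 0 is exact
  (bins.map (fun b => counts.getD b 0), bins)

-- ===== PORT B =====
-- the while loop of Source B: consume one run of equal values per step
def binRuns (s : List Int) : List Int × List Int :=
  match s with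
  | [] => ([], [])
  | x :: xs =>
      let c : Int := 1 + (xs.takeWhile (fun a => a == x)).length
      let p := binRuns (xs.dropWhile (fun a => a == x))
      (c :: p.1, x :: p.2)
termination_by s.length
decreasing_by
  simp only [List.length_cons]
  exact Nat.lt_succ_of_le (List.Sublist.length_le (List.dropWhile_sublist _))

def bin_exact_alt (y : List Int) : List Int × List Int :=
  binRuns (PySem.List.sorted y (fun v => v) false)

-- ===== PRECONDITION & SPEC =====
def Spec_bin_exact (y : List Int) (out : List Int × List Int) : Prop := out = bin_exact_alt y
instance (y : List Int) (out : List Int × List Int) : Decidable (Spec_bin_exact y out) := by unfold Spec_bin_exact; infer_instance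

-- ===== CLAIM (what is proved, stated in full; the proofs are below) =====
def Claim_equal_bin_exact : Prop := ∀ (y : List Int), Dom_bin_exact y → Spec_bin_exact y (bin_exact y)

-- ===== LEMMAS AND PROOFS =====

-- A's counting loop builds exactly Counter(y)
theorem binExact_fold_eq_counter (y : List Int) :
    y.foldl (fun d e => if d.contains e then d.insert e (d.getD e 0 + 1) else d.insert e 1)
      (PySem.Dict.empty : PySem.Dict Int Int) = PySem.Dict.counter y := by
  rw [← PySem.Dict.foldl_insert_getD_add_one_eq_counter]
  have hf : (fun (d : PySem.Dict Int Int) e =>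
      if d.contains e then d.insert e (d.getD e 0 + 1) else d.insert e 1)
      = fun d e => d.insert e (d.getD e 0 + 1) := by
    funext d e
    by_cases h : d.contains e = true
    · simp [h]
    · simp only [Bool.not_eq_true] at h
      simp [h, PySem.Dict.getD_of_not_contains d 0 h]
  rw [hf]

-- A's result in closed form
theorem bin_exact_eq (y : List Int) :
    bin_exact y =
      ((PySem.List.sorted (PySem.Set.ofList y) (fun b => b) false).map
         (fun b => (y.count b : Int)),
       PySem.List.sorted (PySem.Set.ofList y) (fun b => b) false) := by
  simp only [bin_exact, binExact_fold_eq_counter, PySem.Dict.keys_counter]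
  refine congrArg (fun l => (l, _)) ?_
  exact List.map_congr_left (fun b _ => PySem.Dict.getD_counter y b)

-- B's run-grouping pass on a sorted list: bins are strictly increasing, contain
-- exactly the elements of s, and each count is the multiplicity in s
theorem binRuns_spec (s : List Int) (hs : s.Pairwise (· ≤ ·)) :
    (binRuns s).2.Pairwise (· < ·) ∧ (∀ a, a ∈ (binRuns s).2 ↔ a ∈ s) ∧
      (binRuns s).1 = (binRuns s).2.map (fun v => (s.count v : Int)) := by
  induction s using binRuns.induct with
  | case1 => simp [binRuns]
  | case2 x xs ih =>
    have hxs : ∀ a ∈ xs, x ≤ a := fun a ha => List.rel_of_pairwise_cons hs ha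
    have hxsp : xs.Pairwise (· ≤ ·) := hs.of_cons
    set t := xs.takeWhile (fun a => a == x) with ht
    set r := xs.dropWhile (fun a => a == x) with hr
    have hsplit : t ++ r = xs := List.takeWhile_append_dropWhile
    have htx : ∀ a ∈ t, a = x := by
      intro a ha
      have := List.mem_takeWhile_imp ha
      simpa using this
    have hrp : r.Pairwise (· ≤ ·) := hxsp.sublist (List.dropWhile_sublist _)
    have hrx : ∀ a ∈ r, x < a := by
      cases hhd : r with
      | nil => simp
      | cons h rr =>
        have w : List.dropWhile (fun a => a == x) xs ≠ [] := by
          rw [← hr, hhd]; simp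
        have hh := List.head_dropWhile_not (fun a => a == x) w
        simp only [hr.symm.trans hhd, List.head_cons] at hh
        have hne : h ≠ x := by simpa using hh
        have hhx : x < h := by
          have : h ∈ xs := (List.dropWhile_sublist _).mem (by rw [← hr, hhd]; simp)
          exact lt_of_le_of_ne (hxs h this) (Ne.symm hne)
        intro a ha
        rcases List.mem_cons.1 ha with rfl | ha
        · exact hhx
        · exact lt_of_lt_of_le hhx (List.rel_of_pairwise_cons (hhd ▸ hrp) ha)
    have hxnr : x ∉ r := fun hx => lt_irrefl x (hrx x hx)
    obtain ⟨ih1, ih2, ih3⟩ := ih hrp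
    have hbins : (binRuns (x :: xs)).2 = x :: (binRuns r).2 := by
      rw [binRuns]
    have hcounts : (binRuns (x :: xs)).1 = (1 + (t.length : Int)) :: (binRuns r).1 := by
      rw [binRuns]
    refine ⟨?_, ?_, ?_⟩
    · rw [hbins]
      exact List.Pairwise.cons (fun b hb => hrx b ((ih2 b).1 hb)) ih1
    · intro a
      rw [hbins]
      simp only [List.mem_cons, ih2]
      constructor
      · rintro (rfl | ha)
        · exact Or.inl rfl
        · exact Or.inr ((hsplit ▸ List.mem_append_right t ha))
      · rintro (rfl | ha)
        · exact Or.inl rfl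
        · rw [← hsplit] at ha
          rcases List.mem_append.1 ha with ha | ha
          · exact Or.inl (htx a ha)
          · exact Or.inr ha
    · rw [hbins, hcounts, List.map_cons]
      have hcx : (x :: xs).count x = 1 + t.length := by
        rw [List.count_cons_self, ← hsplit, List.count_append]
        have h1 : t.count x = t.length := List.count_eq_length.2 (fun b hb => (htx b hb).symm ▸ rfl)
        have h2 : r.count x = 0 := List.count_eq_zero.2 hxnr
        omega
      have hrest : (binRuns r).1 = (binRuns r).2.map (fun v => ((x :: xs).count v : Int)) := by
        rw [ih3]
        refine List.map_congr_left (fun v hv => ?_)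
        have hvr : v ∈ r := (ih2 v).1 hv
        have hvx : v ≠ x := fun h => lt_irrefl x (h ▸ hrx v hvr)
        have hvt : v ∉ t := fun h => hvx (htx v h)
        rw [List.count_cons_of_ne (Ne.symm hvx), ← hsplit, List.count_append,
            List.count_eq_zero.2 hvt]
        simp
      rw [← hrest, hcx]
      simp

-- ===== VERDICT (by name: the statement is the Claim_ definition above) =====
theorem bin_exact_spec : Claim_equal_bin_exact := by
  intro y _
  unfold Spec_bin_exact bin_exact_alt
  set s := PySem.List.sorted y (fun v => v) false with hsdef
  have hsp : s.Pairwise (· ≤ ·) := by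
    simpa using PySem.List.sorted_pairwise y (fun v => v)
  obtain ⟨h1, h2, h3⟩ := binRuns_spec s hsp
  have hperm : s.Perm y := PySem.List.sorted_perm y (fun v => v) false
  have hmem : ∀ a, a ∈ (binRuns s).2 ↔ a ∈ PySem.Set.ofList y := by
    intro a
    rw [h2, PySem.Set.mem_ofList]
    exact ⟨fun h => hperm.mem_iff.1 h, fun h => hperm.mem_iff.2 h⟩
  have hnd : (binRuns s).2.Nodup := h1.imp ne_of_lt
  have hbins : PySem.List.sorted (PySem.Set.ofList y) (fun b => b) false = (binRuns s).2 := by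
    apply PySem.List.sorted_eq_of_perm_of_pairwise_lt
    · exact (List.perm_ext_iff_of_nodup hnd (PySem.Set.nodup_ofList y)).2 hmem
    · simpa using h1
  rw [bin_exact_eq]
  refine Prod.ext ?_ ?_
  · simp only [hbins, h3]
    exact List.map_congr_left (fun v _ => by rw [hperm.count_eq])
  · simpa using hbins
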